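-- pv_equiv track=rewrite | github.com/OTOYO1020/ChatDev_Intermediate | WareHouse/C_287__20250512033912/main.py | is_path_graph
-- ===== SOURCE A (Python) =====
-- from typing import List, Tuple
--
-- def dfs(vertex: int, graph: dict, visited: set, parent: int) -> bool:
--     '''
--     Depth-first search to check connectivity and cycles.
--     '''
--     visited.add(vertex)
--     for neighbor in graph.get(vertex, []):
--         if neighbor not in visited:
--             if not dfs(neighbor, graph, visited, vertex):
--                 return False
--         elif neighbor != parent:  # A cycle is detected
--             return False
--     return True
--
-- def is_path_graph(N: int, M: int, edges: List[Tuple[int, int]]) -> bool: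
--     '''
--     Determines if the given graph is a path graph.
--     '''
--     # A path graph must have exactly N - 1 edges
--     if M != N - 1:
--         return False
--     # Initialize graph with all vertices
--     graph = {i: [] for i in range(1, N + 1)}
--     visited = set()
--     edge_set = set()
--     for u, v in edges:
--         # Check for valid vertex range
--         if u < 1 or u > N or v < 1 or v > N:
--             raise ValueError(f"Vertex {u} or {v} is out of the valid range (1 to {N}).")
--         # Check for self-loops
--         if u == v:
--             raise ValueError("Graph cannot have self-loops.")
--         # Check for multiple edges
--         if (u, v) in edge_set or (v, u) in edge_set:
--             raise ValueError("Graph cannot have multiple edges.")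
--         edge_set.add((u, v))
--         graph[u].append(v)
--         graph[v].append(u)
--     # Start DFS from the first vertex in edges
--     start_vertex = edges[0][0]
--     if not dfs(start_vertex, graph, visited, -1):  # Pass -1 as parent for the root
--         return False
--     # Check if all vertices are visited
--     if len(visited) != N:
--         return False
--     # Check degrees of vertices
--     degree_one_count = 0
--     for vertex in graph:
--         degree = len(graph[vertex])
--         if degree > 2:
--             return False
--         if degree == 1:
--             degree_one_count += 1
--     # A path graph must have exactly two vertices with degree 1
--     return degree_one_count == 2 and all(len(graph[v]) <= 2 for v in graph if v not in (edges[0][0], edges[-1][1]))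
-- ===== SOURCE B (Python) =====
-- def is_path_graph(N, M, edges):
--     '''
--     Determines if the given graph is a path graph.
--     Iterative (explicit stack) DFS instead of recursion; wholesale validation; simplified degree verdict.
--     '''
--     # A path graph must have exactly N - 1 edges
--     if M != N - 1:
--         return False
--     # Validate all edges wholesale
--     if not all(1 <= u <= N and 1 <= v <= N and u != v for u, v in edges):
--         raise ValueError("Graph has an out-of-range vertex or a self-loop.")
--     if len({frozenset(e) for e in edges}) != len(edges):
--         raise ValueError("Graph cannot have multiple edges.")
--     # Build adjacency lists
--     adj = {i: [] for i in range(1, N + 1)}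
--     for u, v in edges:
--         adj[u].append(v)
--         adj[v].append(u)
--     # Iterative DFS with an explicit stack of (vertex, parent, remaining neighbours)
--     start = edges[0][0]
--     visited = {start}
--     stack = [(start, -1, list(adj[start]))]
--     ok = True
--     while stack:
--         v, parent, rest = stack.pop()
--         if not rest:
--             continue
--         w, rest = rest[0], rest[1:]
--         stack.append((v, parent, rest))
--         if w not in visited:
--             visited.add(w)
--             stack.append((w, v, list(adj[w])))
--         elif w != parent:
--             ok = False
--             break
--     degs = [len(adj[v]) for v in adj]
--     return ok and len(visited) == N and all(d <= 2 for d in degs) and degs.count(1) == 2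
-- ===== Notes on version B (the rewrite author's own statement) =====
-- stated objective: alternative
-- what changed: The recursive DFS is replaced by an iterative DFS over an explicit stack of (vertex, parent, remaining-neighbours) frames; validation is done wholesale (an all() pass plus a frozenset duplicate test) before building adjacency, instead of interleaved per-edge checks with an edge set; and the final verdict is simplified to all(d<=2) and degs.count(1)==2, dropping A's redundant endpoint-filtered all() clause.
import Mathlib
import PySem

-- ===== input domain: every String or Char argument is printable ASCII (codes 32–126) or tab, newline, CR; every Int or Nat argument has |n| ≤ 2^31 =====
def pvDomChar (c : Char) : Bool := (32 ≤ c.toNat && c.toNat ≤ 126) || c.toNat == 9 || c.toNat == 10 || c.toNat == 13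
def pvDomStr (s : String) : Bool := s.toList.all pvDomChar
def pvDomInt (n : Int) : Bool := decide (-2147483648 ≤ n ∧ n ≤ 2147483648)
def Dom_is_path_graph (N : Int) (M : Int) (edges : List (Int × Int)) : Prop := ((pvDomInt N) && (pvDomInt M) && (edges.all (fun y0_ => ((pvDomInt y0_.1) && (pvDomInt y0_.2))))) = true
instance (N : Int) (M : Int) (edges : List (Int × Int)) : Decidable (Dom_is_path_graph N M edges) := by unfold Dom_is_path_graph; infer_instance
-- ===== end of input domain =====

-- B replaces A's recursive DFS by an iterative DFS over an explicit stack, validates the edge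
-- list wholesale (frozenset duplicate test), and simplifies the degree verdict; same cost.

-- Measure helpers cited by the ports' decreasing_by (number of U-vertices not yet visited).
def pvFresh (U : List Int) (vis : PySem.Set Int) : Nat :=
  (U.filter (fun x => decide (x ∉ vis))).length

lemma pvFresh_le (U : List Int) (vis vis' : PySem.Set Int)
    (h : ∀ x, x ∈ vis → x ∈ vis') : pvFresh U vis' ≤ pvFresh U vis := by
  unfold pvFresh
  rw [← List.countP_eq_length_filter, ← List.countP_eq_length_filter]
  refine List.countP_mono_left (fun a _ ha => ?_)
  simp only [decide_eq_true_eq] at ha ⊢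
  exact fun hm => ha (h a hm)

lemma pvFresh_add_lt (U : List Int) (vis : PySem.Set Int) (w : Int)
    (hU : w ∈ U) (hv : w ∉ vis) :
    pvFresh U (PySem.Set.add vis w) < pvFresh U vis := by
  have hsub : ∀ x, x ∈ vis → x ∈ PySem.Set.add vis w :=
    fun x hx => (PySem.Set.mem_add _ _ _).2 (Or.inl hx)
  induction U with
  | nil => cases hU
  | cons a U ih =>
    have hle := pvFresh_le U vis (PySem.Set.add vis w) hsub
    unfold pvFresh at hle ⊢
    simp only [List.filter_cons]
    by_cases ha1 : a ∈ PySem.Set.add vis w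
    · by_cases ha3 : a ∈ vis
      · rcases List.mem_cons.1 hU with rfl | hU'
        · exact absurd ha3 hv
        · have := ih hU'
          unfold pvFresh at this
          simp only [ha1, ha3, not_true_eq_false, decide_false, Bool.false_eq_true, if_false]
          exact this
      · have haw : a = w := ((PySem.Set.mem_add _ _ _).1 ha1).resolve_left ha3
        simp only [ha1, ha3, not_true_eq_false, not_false_eq_true, decide_false, decide_true,
          Bool.false_eq_true, if_false, if_true, List.length_cons]
        omega
    · have ha3 : a ∉ vis := fun hx => ha1 (hsub a hx)
      have haw : a ≠ w := fun h => ha1 ((PySem.Set.mem_add _ _ _).2 (Or.inr h))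
      rcases List.mem_cons.1 hU with rfl | hU'
      · exact absurd rfl haw
      · have := ih hU'
        unfold pvFresh at this
        simp only [ha1, ha3, not_false_eq_true, decide_true, if_true, List.length_cons]
        omega

lemma not_mem_of_contains_false {s : PySem.Set Int} {x : Int}
    (h : PySem.Set.contains s x = false) : x ∉ s :=
  fun hm => by simp only [PySem.Set.contains_eq_listContains, List.contains_eq_mem,
    decide_eq_false_iff_not] at h; exact h hm

-- ===== PORT A =====
-- A's per-edge validation loop: returns none exactly where Python raises ValueError.
def validateA (N : Int) (edges : List (Int × Int)) (g : PySem.Dict Int (List Int))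
    (es : PySem.Set (Int × Int)) : Option (PySem.Dict Int (List Int)) :=
  match edges with
  | [] => some g
  | (u, v) :: rest =>
    if u < 1 ∨ u > N ∨ v < 1 ∨ v > N then none
    else if u = v then none
    else if PySem.Set.contains es (u, v) || PySem.Set.contains es (v, u) then none
    else validateA N rest ((g.modify u [] (· ++ [v])).modify v [] (· ++ [u]))
        (PySem.Set.add es (u, v))

-- A's recursive dfs, state-passing (visited is threaded).  U (the dict's key list) and the
-- `w ∈ U` guard / `PySem.Set.update` envelope are totality devices only: in every run admitted by
-- Pre_ each neighbour w is a key of the dict and the inner call only extends vis, so the guard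
-- is true and the update is the identity.
def goA (g : PySem.Dict Int (List Int)) (U : List Int) (ns : List Int) (v p : Int)
    (vis : PySem.Set Int) : Bool × PySem.Set Int :=
  match ns with
  | [] => (true, vis)
  | w :: ws =>
    if h : PySem.Set.contains vis w = false ∧ w ∈ U then
      match hr : goA g U (g.getD w []) w v (PySem.Set.add vis w) with
      | (false, vis') => (false, vis')
      | (true, vis') => goA g U ws v p (PySem.Set.update vis vis')
    else if PySem.Set.contains vis w = false then (false, vis)
    else if w ≠ p then (false, vis)
    else goA g U ws v p vis
termination_by (pvFresh U vis, ns.length)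
decreasing_by
  · exact Prod.Lex.left _ _ (pvFresh_add_lt U vis w h.2 (not_mem_of_contains_false h.1))
  · have hle : pvFresh U (PySem.Set.update vis vis') ≤ pvFresh U vis :=
      pvFresh_le U _ _ (fun x hx => (PySem.Set.mem_update _ _ _).2 (Or.inl hx))
    rcases Nat.lt_or_ge (pvFresh U (PySem.Set.update vis vis')) (pvFresh U vis) with h' | h'
    · exact Prod.Lex.left _ _ h'
    · have heq : pvFresh U (PySem.Set.update vis vis') = pvFresh U vis := le_antisymm hle h'
      rw [heq]; exact Prod.Lex.right _ (by simp)
  · exact Prod.Lex.right _ (by simp)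

def dfsA (g : PySem.Dict Int (List Int)) (U : List Int) (v p : Int)
    (vis : PySem.Set Int) : Bool × PySem.Set Int :=
  goA g U (g.getD v []) v p (PySem.Set.add vis v)

-- A's final degree loop (early exit on a degree > 2, then the redundant endpoint-filtered all()).
def degLoopA (g : PySem.Dict Int (List Int)) (allKeys : List Int) (e0 eL : Int)
    (ks : List Int) (cnt : Int) : Bool :=
  match ks with
  | [] => (cnt == 2) &&
      (allKeys.filter (fun v => !(v == e0 || v == eL))).all (fun v => (g.getD v []).length ≤ 2)
  | k :: ks' =>
    let d := (g.getD k []).length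
    if d > 2 then false
    else degLoopA g allKeys e0 eL ks' (if d = 1 then cnt + 1 else cnt)

def is_path_graph (N : Int) (M : Int) (edges : List (Int × Int)) : Bool :=
  if M ≠ N - 1 then false
  else
    let graph0 : PySem.Dict Int (List Int) :=
      (PySem.List.pyRange 1 (N + 1) 1).foldl (fun d i => d.insert i ([] : List Int)) PySem.Dict.empty
    match validateA N edges graph0 PySem.Set.empty with
    | none => false           -- Python raises ValueError here (outside Pre_)
    | some graph =>
      match PySem.List.pyGet? edges 0, PySem.List.pyGet? edges (-1) with
      | some e0, some eL =>
        let r := dfsA graph graph.keys e0.1 (-1) PySem.Set.empty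
        if !r.1 then false
        else if (r.2.length : Int) ≠ N then false
        else degLoopA graph graph.keys e0.1 eL.2 graph.keys 0
      | _, _ => false         -- Python raises IndexError on edges[0] (edges = []; outside Pre_)

-- ===== PORT B =====
-- B's iterative DFS: a stack of (vertex, parent, remaining neighbours) frames.  The `w ∈ U`
-- guard is the same totality device as in goA, unreachable in runs admitted by Pre_.
def pvWeight (stack : List (Int × Int × List Int)) : Nat :=
  (stack.map (fun f => 1 + f.2.2.length)).sum

def execAlt (g : PySem.Dict Int (List Int)) (U : List Int)
    (stack : List (Int × Int × List Int)) (vis : PySem.Set Int) : Bool × PySem.Set Int :=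
  match stack with
  | [] => (true, vis)
  | (_, _, []) :: rest => execAlt g U rest vis
  | (v, p, w :: ws) :: rest =>
    if h : PySem.Set.contains vis w = false ∧ w ∈ U then
      execAlt g U ((w, v, g.getD w []) :: (v, p, ws) :: rest) (PySem.Set.add vis w)
    else if PySem.Set.contains vis w = false then (false, vis)
    else if w ≠ p then (false, vis)
    else execAlt g U ((v, p, ws) :: rest) vis
termination_by (pvFresh U vis, pvWeight stack)
decreasing_by
  · exact Prod.Lex.right _ (by simp [pvWeight])
  · exact Prod.Lex.left _ _ (pvFresh_add_lt U vis w h.2 (not_mem_of_contains_false h.1))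
  · exact Prod.Lex.right _ (by simp [pvWeight])

def pvNorm (e : Int × Int) : Int × Int := if e.1 ≤ e.2 then e else (e.2, e.1)

def is_path_graph_alt (N : Int) (M : Int) (edges : List (Int × Int)) : Bool :=
  if M ≠ N - 1 then false
  else if !(edges.all (fun e => decide (1 ≤ e.1) && decide (e.1 ≤ N) && decide (1 ≤ e.2)
      && decide (e.2 ≤ N) && !(e.1 == e.2))) then false
    -- Python raises ValueError here (outside Pre_)
  else if ((PySem.Set.ofList (edges.map pvNorm)).length : Int) ≠ PySem.List.len edges then false
    -- frozenset({u,v}) ported as the sorted pair pvNorm; Python raises ValueError here (outside Pre_)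
  else
    let adj := edges.foldl (fun d e => (d.modify e.1 [] (· ++ [e.2])).modify e.2 [] (· ++ [e.1]))
      ((PySem.List.pyRange 1 (N + 1) 1).foldl (fun d i => d.insert i ([] : List Int)) PySem.Dict.empty)
    match edges with
    | [] => false             -- Python raises IndexError on edges[0] (outside Pre_)
    | e :: _ =>
      let r := execAlt adj adj.keys [(e.1, -1, adj.getD e.1 [])]
        (PySem.Set.add PySem.Set.empty e.1)
      let degs := adj.keys.map (fun v => (adj.getD v []).length)
      r.1 && ((r.2.length : Int) == N) && degs.all (fun d => d ≤ 2) && (degs.count 1 == 2)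

-- ===== PRECONDITION & SPEC =====
-- Pre_ excludes exactly the inputs where A raises: with M = N - 1, an out-of-range endpoint,
-- a self-loop or a repeated (possibly reversed) edge raises ValueError, and an empty edge
-- list raises IndexError at edges[0].
def Pre_is_path_graph (N : Int) (M : Int) (edges : List (Int × Int)) : Prop :=
  M ≠ N - 1 ∨ (edges ≠ [] ∧
    (∀ e ∈ edges, 1 ≤ e.1 ∧ e.1 ≤ N ∧ 1 ≤ e.2 ∧ e.2 ≤ N ∧ e.1 ≠ e.2) ∧
    List.Pairwise (fun a b => b ≠ a ∧ b ≠ (a.2, a.1)) edges)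
instance (N : Int) (M : Int) (edges : List (Int × Int)) : Decidable (Pre_is_path_graph N M edges) := by
  unfold Pre_is_path_graph; infer_instance

def pvWitness_is_path_graph : Int × Int × (List (Int × Int)) := (3, 2, [(1, 2), (2, 3)])

def Spec_is_path_graph (N : Int) (M : Int) (edges : List (Int × Int)) (out : Bool) : Prop :=
  out = is_path_graph_alt N M edges
instance (N : Int) (M : Int) (edges : List (Int × Int)) (out : Bool) :
    Decidable (Spec_is_path_graph N M edges out) := by unfold Spec_is_path_graph; infer_instance

-- ===== CLAIM (what is proved, stated in full; the proofs are below) =====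
def Claim_equal_is_path_graph : Prop := ∀ (N : Int) (M : Int) (edges : List (Int × Int)),
  Dom_is_path_graph N M edges → Pre_is_path_graph N M edges →
  Spec_is_path_graph N M edges (is_path_graph N M edges)

-- ===== LEMMAS AND PROOFS =====

lemma pvNorm_eq_imp (a b : Int × Int) (h : pvNorm a = pvNorm b) : b = a ∨ b = (a.2, a.1) := by
  obtain ⟨a1, a2⟩ := a; obtain ⟨b1, b2⟩ := b
  unfold pvNorm at h
  simp only at h
  split_ifs at h <;> simp only [Prod.mk.injEq] at h ⊢ <;> omega

lemma execAlt_nil (g : PySem.Dict Int (List Int)) (U : List Int) (vis : PySem.Set Int) :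
    execAlt g U [] vis = (true, vis) := by
  rw [execAlt]

lemma prefix_add (vis : PySem.Set Int) (w : Int) : vis <+: PySem.Set.add vis w := by
  rw [PySem.Set.add_eq_ite]
  split
  · exact List.prefix_refl _
  · exact List.prefix_append _ _

lemma update_prefix_eq (vis s : PySem.Set Int) (hpre : vis <+: s) (hs : s.Nodup) :
    PySem.Set.update vis s = s := by
  obtain ⟨t, rfl⟩ := hpre
  rw [PySem.Set.update_append]
  have h1 : PySem.Set.update vis vis = vis := by
    rw [PySem.Set.update_eq_append_filter]
    have : (PySem.Set.ofList vis).filter (fun y => !(PySem.Set.contains vis y)) = [] := by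
      rw [List.filter_eq_nil_iff]
      intro a ha
      have : a ∈ vis := (PySem.Set.mem_ofList _ _).1 ha
      simp [this]
    rw [this, List.append_nil]
  rw [h1]
  have hnd := List.Nodup.of_append_right hs
  have hdisj : ∀ x ∈ t, x ∉ vis := by
    intro x hx hxv
    exact (List.disjoint_of_nodup_append hs) hxv hx
  exact PySem.Set.update_eq_append_of_disjoint vis t hnd hdisj

lemma goA_inv (g : PySem.Dict Int (List Int)) (U : List Int) (ns : List Int) (v p : Int)
    (vis : PySem.Set Int) :
    vis.Nodup → ((goA g U ns v p vis).2.Nodup ∧ vis <+: (goA g U ns v p vis).2) := by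
  fun_induction goA g U ns v p vis
  case case1 => exact fun h => ⟨h, List.prefix_refl _⟩
  case case2 v' p' vis w ws h vis' hr ih =>
    intro hnd
    have := ih (PySem.Set.nodup_add _ _ hnd)
    rw [hr] at this
    exact ⟨this.1, ((prefix_add vis w).trans this.2)⟩
  case case3 v' p' vis w ws h vis' hr ih2 ih1 =>
    intro hnd
    have hin := ih2 (PySem.Set.nodup_add _ _ hnd)
    rw [hr] at hin
    have hpre : vis <+: vis' := ((prefix_add vis w).trans hin.2)
    have hupd : PySem.Set.update vis vis' = vis' := update_prefix_eq vis vis' hpre hin.1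
    rw [hupd] at ih1 ⊢
    have := ih1 hin.1
    exact ⟨this.1, (hpre.trans this.2)⟩
  case case4 => exact fun h => ⟨h, List.prefix_refl _⟩
  case case5 => exact fun h => ⟨h, List.prefix_refl _⟩
  case case6 v' p' vis w ws h1 h2 h3 ih1 => exact ih1

lemma exec_sim (g : PySem.Dict Int (List Int)) (U : List Int) (ns : List Int) (v p : Int)
    (vis : PySem.Set Int) :
    vis.Nodup → ∀ rest, execAlt g U ((v, p, ns) :: rest) vis =
      (if (goA g U ns v p vis).1 then execAlt g U rest (goA g U ns v p vis).2
       else (false, (goA g U ns v p vis).2)) := by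
  fun_induction goA g U ns v p vis
  case case1 =>
    intro _ rest
    conv_lhs => rw [execAlt]
    simp
  case case2 v' p' vis w ws h vis' hr ih =>
    intro hnd rest
    conv_lhs => rw [execAlt]
    rw [dif_pos h]
    have := ih (PySem.Set.nodup_add _ _ hnd) ((v', p', ws) :: rest)
    rw [hr] at this
    simpa using this
  case case3 v' p' vis w ws h vis' hr ih2 ih1 =>
    intro hnd rest
    conv_lhs => rw [execAlt]
    rw [dif_pos h]
    have hin := goA_inv g U (g.getD w []) w v' (vis.add w) (PySem.Set.nodup_add _ _ hnd)
    rw [hr] at hin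
    have hpre : vis <+: vis' := (prefix_add vis w).trans hin.2
    have hupd : PySem.Set.update vis vis' = vis' := update_prefix_eq vis vis' hpre hin.1
    have hstep := ih2 (PySem.Set.nodup_add _ _ hnd) ((v', p', ws) :: rest)
    rw [hr] at hstep
    simp only [if_pos] at hstep
    rw [hstep, hupd]
    rw [hupd] at ih1
    exact ih1 hin.1 rest
  case case4 v' p' vis w ws h1 h2 =>
    intro hnd rest
    conv_lhs => rw [execAlt]
    rw [dif_neg h1, if_pos h2]
    simp
  case case5 v' p' vis w ws h1 h2 h3 =>
    intro hnd rest
    conv_lhs => rw [execAlt]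
    rw [dif_neg h1, if_neg h2, if_pos h3]
    simp
  case case6 v' p' vis w ws h1 h2 h3 ih1 =>
    intro hnd rest
    conv_lhs => rw [execAlt]
    rw [dif_neg h1, if_neg h2, if_neg h3]
    exact ih1 hnd rest

lemma validateA_some (N : Int) :
    ∀ (edges : List (Int × Int)) (g : PySem.Dict Int (List Int)) (es : PySem.Set (Int × Int)),
    (∀ e ∈ edges, 1 ≤ e.1 ∧ e.1 ≤ N ∧ 1 ≤ e.2 ∧ e.2 ≤ N ∧ e.1 ≠ e.2) →
    List.Pairwise (fun a b => b ≠ a ∧ b ≠ (a.2, a.1)) edges →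
    (∀ e ∈ edges, (e.1, e.2) ∉ es ∧ (e.2, e.1) ∉ es) →
    validateA N edges g es = some (edges.foldl
      (fun d e => (d.modify e.1 [] (· ++ [e.2])).modify e.2 [] (· ++ [e.1])) g)
  | [], g, es, _, _, _ => rfl
  | (u, v) :: rest, g, es, hval, hpw, hes => by
    obtain ⟨h1, h2, h3, h4, h5⟩ := hval _ (List.mem_cons_self ..)
    obtain ⟨hhead, htail⟩ := List.pairwise_cons.1 hpw
    have hmem := hes (u, v) (List.mem_cons_self ..)
    have hc1 : PySem.Set.contains es (u, v) = false := by
      simp only [PySem.Set.contains_eq_listContains, List.contains_eq_mem]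
      simpa using hmem.1
    have hc2 : PySem.Set.contains es (v, u) = false := by
      simp only [PySem.Set.contains_eq_listContains, List.contains_eq_mem]
      simpa using hmem.2
    rw [validateA]
    rw [if_neg (by omega), if_neg h5, hc1, hc2]
    simp only [Bool.or_false, Bool.false_eq_true, if_false]
    rw [validateA_some N rest _ _
      (fun e he => hval e (List.mem_cons_of_mem _ he)) htail
      (fun e he => by
        constructor
        · intro hmem
          rcases (PySem.Set.mem_add _ _ _).1 hmem with hm | hm
          · exact (hes e (List.mem_cons_of_mem _ he)).1 hm
          · exact (hhead e he).1 hm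
        · intro hmem
          rcases (PySem.Set.mem_add _ _ _).1 hmem with hm | hm
          · exact (hes e (List.mem_cons_of_mem _ he)).2 hm
          · obtain ⟨a, b⟩ := e
            simp only [Prod.mk.injEq] at hm
            exact (hhead (a, b) he).2 (by simp [hm.1, hm.2]))]
    rfl

lemma degLoopA_eq (g : PySem.Dict Int (List Int)) (aK : List Int) (e0 eL : Int) :
    ∀ (ks : List Int) (cnt : Int),
    degLoopA g aK e0 eL ks cnt =
      if ks.all (fun k => (g.getD k []).length ≤ 2) then
        ((cnt + ((ks.map fun k => (g.getD k []).length).count 1 : Int)) == 2) &&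
          (aK.filter (fun v => !(v == e0 || v == eL))).all (fun v => (g.getD v []).length ≤ 2)
      else false
  | [], cnt => by simp [degLoopA]
  | k :: ks, cnt => by
    rw [degLoopA]
    by_cases hd : (g.getD k []).length > 2
    · rw [if_pos hd]
      have : ((k :: ks).all (fun k => (g.getD k []).length ≤ 2)) = false := by
        simp [List.all_cons]; omega
      rw [this]
      simp
    · rw [if_neg hd]
      rw [degLoopA_eq g aK e0 eL ks _]
      have hk2 : (g.getD k []).length ≤ 2 := by omega
      simp only [List.all_cons, hk2, decide_true, Bool.true_and]
      by_cases hall : ks.all (fun k => (g.getD k []).length ≤ 2)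
      · rw [hall]
        simp only [if_true]
        congr 1
        have : ((k :: ks).map fun k => (g.getD k []).length) = (g.getD k []).length :: (ks.map fun k => (g.getD k []).length) := rfl
        rw [this, List.count_cons]
        by_cases hd1 : (g.getD k []).length = 1
        · simp [hd1]; ring_nf
        · have : ¬((1 : Nat) = (g.getD k []).length) := fun h => hd1 h.symm
          simp [hd1]
      · simp only [Bool.not_eq_true] at hall
        rw [hall]
        simp

-- ===== VERDICT (by name: the statement is the Claim_ definition above) =====
theorem is_path_graph_spec : Claim_equal_is_path_graph := by
  intro N M edges _ hpre
  unfold Spec_is_path_graph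
  by_cases hM : M ≠ N - 1
  · unfold is_path_graph is_path_graph_alt
    rw [if_pos hM, if_pos hM]
  · rcases hpre with hpre | ⟨hne, hval, hpw⟩
    · exact absurd hpre hM
    unfold is_path_graph is_path_graph_alt
    rw [if_neg hM, if_neg hM]
    -- B's wholesale validity check passes
    have hall : (edges.all (fun e => decide (1 ≤ e.1) && decide (e.1 ≤ N) && decide (1 ≤ e.2)
        && decide (e.2 ≤ N) && !(e.1 == e.2))) = true := by
      rw [List.all_eq_true]
      intro e he
      obtain ⟨h1, h2, h3, h4, h5⟩ := hval e he
      simp [h1, h2, h3, h4, h5]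
    rw [hall]
    simp only [Bool.not_true, Bool.false_eq_true, if_false]
    -- B's duplicate check passes
    have hnodup : (edges.map pvNorm).Nodup := by
      rw [List.Nodup, List.pairwise_map]
      exact hpw.imp (fun {a b} hab hnorm => by
        rcases pvNorm_eq_imp a b hnorm with h | h
        · exact hab.1 h
        · exact hab.2 h)
    have hlen : ((PySem.Set.ofList (edges.map pvNorm)).length : Int) = PySem.List.len edges := by
      rw [PySem.Set.ofList_eq_self_of_nodup _ hnodup, PySem.List.len_eq, List.length_map]
    rw [if_neg (fun hc => hc hlen)]
    -- A's validation loop succeeds and builds the same adjacency dict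
    rw [validateA_some N edges _ PySem.Set.empty hval hpw
      (fun e _ => ⟨by simp [PySem.Set.empty], by simp [PySem.Set.empty]⟩)]
    obtain ⟨e, tl, rfl⟩ := List.exists_cons_of_ne_nil hne
    obtain ⟨eL, hL⟩ : ∃ x, (e :: tl).getLast? = some x :=
      Option.isSome_iff_exists.1 (List.getLast?_isSome.2 (by simp))
    rw [PySem.List.pyGet?_zero_cons, PySem.List.pyGet?_neg_one, hL]
    set G := List.foldl (fun d e => (d.modify e.1 [] fun x => x ++ [e.2]).modify e.2 [] fun x => x ++ [e.1])
      (List.foldl (fun d i => d.insert i []) PySem.Dict.empty (PySem.List.pyRange 1 (N + 1))) (e :: tl) with hG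
    simp only []
    have hvis0 : PySem.Set.add PySem.Set.empty e.1 = [e.1] := by
      rw [PySem.Set.add_eq_ite]
      simp [PySem.Set.empty]
    have hnd0 : (PySem.Set.add PySem.Set.empty e.1).Nodup := by rw [hvis0]; simp
    have hsim := exec_sim G G.keys (G.getD e.1 []) e.1 (-1) (PySem.Set.add PySem.Set.empty e.1) hnd0 []
    rw [execAlt_nil] at hsim
    unfold dfsA
    set r := goA G G.keys (G.getD e.1 []) e.1 (-1) (PySem.Set.add PySem.Set.empty e.1) with hr
    rw [hsim]
    by_cases hok : r.1 = true
    · simp only [hok, if_true, Bool.not_true, Bool.false_eq_true, if_false, Bool.true_and]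
      by_cases hlenN : ((r.2.length : Int)) = N
      · rw [if_neg (fun hc => hc hlenN)]
        have hbeq : (((r.2.length : Int)) == N) = true := beq_iff_eq.2 hlenN
        rw [hbeq]
        simp only [Bool.true_and]
        rw [degLoopA_eq]
        by_cases hall2 : (G.keys.all fun k => decide ((G.getD k []).length ≤ 2)) = true
        · rw [if_pos hall2]
          have htr : ((G.keys.filter fun v => !(v == e.1 || v == eL.2)).all
              fun v => decide ((G.getD v []).length ≤ 2)) = true := by
            rw [List.all_eq_true]
            intro v hv
            exact List.all_eq_true.1 hall2 v (List.mem_filter.1 hv).1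
          rw [htr, Bool.and_true]
          have hmap : ((G.keys.map fun v => (G.getD v []).length).all fun d => decide (d ≤ 2)) = true := by
            rw [List.all_map]
            exact hall2
          rw [hmap, Bool.true_and]
          have hc : ∀ c : Nat, (((0 : Int) + (c : Int)) == 2) = (c == 2) := by
            intro c
            by_cases h : c = 2 <;> simp [h] <;> exact fun hcast => h (by exact_mod_cast hcast)
          exact hc _
        · rw [if_neg hall2]
          have hmap : ((G.keys.map fun v => (G.getD v []).length).all fun d => decide (d ≤ 2)) = false := by
            rw [List.all_map]
            exact Bool.not_eq_true _ ▸ (by simpa using hall2)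
          rw [hmap]
          simp
      · rw [if_pos hlenN]
        have hbeq : (((r.2.length : Int)) == N) = false := by
          simpa using hlenN
        rw [hbeq]
        simp
    · have hok' : r.1 = false := by simpa using hok
      simp [hok']
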